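-- pv_equiv track=rewrite | github.com/AATools/ib-metrics-pyclient | modules/iib_brokers.py | get_broker_items
-- ===== SOURCE A (Python) =====
-- def get_broker_items(broker_row_data):
--     """Returns lists with data for broker items: execution groups, applications, message flows."""
--     output_list = broker_row_data.split('\n')
--     exec_groups = list()
--     applications = list()
--     message_flows = list()
--     # See IBM diagnostic messages:
--     # https://www.ibm.com/support/knowledgecenter/en/SSMKHH_9.0.0/com.ibm.etools.mft.bipmsgs.doc/ay_bip1.htm
--     # Also you can use command: mqsiexplain <bip_code>
--     bip_codes = {
--      'BIP1286I': exec_groups,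
--      'BIP1287I': exec_groups,
--      'BIP1275I': applications,
--      'BIP1276I': applications,
--      'BIP1277I': message_flows,
--      'BIP1278I': message_flows}
--     for record in output_list:
--         if record:
--             bip_code = record.split()[0].replace(':', '')
--             if bip_code in bip_codes.keys():
--                 bip_codes[bip_code].append(record)
--     return exec_groups, applications, message_flows
-- ===== SOURCE B (Python) =====
-- def get_broker_items(broker_row_data):
--     """Returns lists with data for broker items: execution groups, applications, message flows."""
--     lines = broker_row_data.split('\n')
--
--     def pick(codes):
--         return [r for r in lines if r and r.split()[0].replace(':', '') in codes]
--
--     exec_groups = pick({'BIP1286I', 'BIP1287I'})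
--     applications = pick({'BIP1275I', 'BIP1276I'})
--     message_flows = pick({'BIP1277I', 'BIP1278I'})
--     return exec_groups, applications, message_flows
-- ===== Notes on version B (the rewrite author's own statement) =====
-- stated objective: simpler
-- what changed: Replaces the single dispatching loop over a dict of shared list references with three independent filtering passes, one per category, each a plain comprehension over the split lines.
import Mathlib
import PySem

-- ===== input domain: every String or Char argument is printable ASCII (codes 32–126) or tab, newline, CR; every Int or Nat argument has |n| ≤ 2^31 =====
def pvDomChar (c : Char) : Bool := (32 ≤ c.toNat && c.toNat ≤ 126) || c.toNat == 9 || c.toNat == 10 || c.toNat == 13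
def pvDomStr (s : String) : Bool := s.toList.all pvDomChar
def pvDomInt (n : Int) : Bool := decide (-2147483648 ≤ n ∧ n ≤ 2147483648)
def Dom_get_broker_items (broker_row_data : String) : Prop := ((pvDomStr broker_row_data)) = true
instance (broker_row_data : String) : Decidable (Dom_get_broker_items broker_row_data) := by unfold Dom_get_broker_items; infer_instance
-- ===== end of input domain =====

-- B replaces A's single dispatching loop (dict of shared list references) with three
-- independent per-category filtering passes; objective: simpler.

-- ===== PORT A =====
-- first word of the record with ':' removed; Python indexes record.split()[0] (raises on a
-- whitespace-only record — those inputs are outside Pre_, here the index defaults to "")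
def pvBip (record : String) : String :=
  PySem.Str.replace ((PySem.Str.split₀ record).headD "") ":" ""

-- A's loop body: the dict maps each BIP code to one of the three shared lists; the loop
-- appends the record to the corresponding list when the code is a key
def pvStep (st : List String × List String × List String) (record : String) :
    List String × List String × List String :=
  if record ≠ "" then
    let bip_code := pvBip record
    if bip_code = "BIP1286I" ∨ bip_code = "BIP1287I" then (st.1 ++ [record], st.2.1, st.2.2)
    else if bip_code = "BIP1275I" ∨ bip_code = "BIP1276I" then (st.1, st.2.1 ++ [record], st.2.2)
    else if bip_code = "BIP1277I" ∨ bip_code = "BIP1278I" then (st.1, st.2.1, st.2.2 ++ [record])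
    else st
  else st

def get_broker_items (broker_row_data : String) : List String × List String × List String :=
  let output_list := (PySem.Str.split? broker_row_data "\n").getD []  -- sep "\n" ≠ "": always some
  output_list.foldl pvStep ([], [], [])

-- ===== PORT B =====
def pvPick (lines : List String) (codes : List String) : List String :=
  lines.filter (fun r => r ≠ "" && codes.contains (pvBip r))

def get_broker_items_alt (broker_row_data : String) : List String × List String × List String :=
  let lines := (PySem.Str.split? broker_row_data "\n").getD []  -- sep "\n" ≠ "": always some
  (pvPick lines ["BIP1286I", "BIP1287I"],
   pvPick lines ["BIP1275I", "BIP1276I"],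
   pvPick lines ["BIP1277I", "BIP1278I"])

-- ===== PRECONDITION & SPEC =====
-- Pre_ excludes inputs containing a non-empty whitespace-only line, on which Python A
-- (and Python B alike) raises IndexError at record.split()[0].
def Pre_get_broker_items (broker_row_data : String) : Prop :=
  ∀ line ∈ (PySem.Str.split? broker_row_data "\n").getD [],
    line = "" ∨ PySem.Str.strIsspace line = false
instance (broker_row_data : String) : Decidable (Pre_get_broker_items broker_row_data) := by unfold Pre_get_broker_items; infer_instance

def pvWitness_get_broker_items : String := "BIP1286I: eg1\nBIP1275I app\n\nother"

def Spec_get_broker_items (broker_row_data : String) (out : List String × List String × List String) : Prop := out = get_broker_items_alt broker_row_data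
instance (broker_row_data : String) (out : List String × List String × List String) : Decidable (Spec_get_broker_items broker_row_data out) := by unfold Spec_get_broker_items; infer_instance

-- ===== CLAIM (what is proved, stated in full; the proofs are below) =====
def Claim_equal_get_broker_items : Prop := ∀ (broker_row_data : String), Dom_get_broker_items broker_row_data → Pre_get_broker_items broker_row_data → Spec_get_broker_items broker_row_data (get_broker_items broker_row_data)

-- ===== LEMMAS AND PROOFS =====
-- A's fold, started from any state, appends exactly B's three category filters.
theorem pv_fold_eq (ls : List String) (e a m : List String) :
    ls.foldl pvStep (e, a, m)
    = (e ++ pvPick ls ["BIP1286I", "BIP1287I"],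
       a ++ pvPick ls ["BIP1275I", "BIP1276I"],
       m ++ pvPick ls ["BIP1277I", "BIP1278I"]) := by
  induction ls generalizing e a m with
  | nil => simp [pvPick]
  | cons r t ih =>
    rw [List.foldl_cons]
    by_cases hr : r = ""
    · have hs : pvStep (e, a, m) r = (e, a, m) := by simp [pvStep, hr]
      rw [hs, ih]
      simp [pvPick, hr]
    · by_cases h1 : pvBip r = "BIP1286I" ∨ pvBip r = "BIP1287I"
      · have hs : pvStep (e, a, m) r = (e ++ [r], a, m) := by simp [pvStep, hr, h1]
        rw [hs, ih]
        have h1' : ¬ (pvBip r = "BIP1275I" ∨ pvBip r = "BIP1276I") := by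
          rcases h1 with h | h <;> simp [h]
        have h1'' : ¬ (pvBip r = "BIP1277I" ∨ pvBip r = "BIP1278I") := by
          rcases h1 with h | h <;> simp [h]
        simp [pvPick, List.filter_cons, hr]
        refine ⟨?_, ?_, ?_⟩
        · rcases h1 with h | h <;> simp [h]
        · push Not at h1'; simp [h1'.1, h1'.2]
        · push Not at h1''; simp [h1''.1, h1''.2]
      · by_cases h2 : pvBip r = "BIP1275I" ∨ pvBip r = "BIP1276I"
        · have hs : pvStep (e, a, m) r = (e, a ++ [r], m) := by simp [pvStep, hr, h1, h2]
          rw [hs, ih]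
          have h2'' : ¬ (pvBip r = "BIP1277I" ∨ pvBip r = "BIP1278I") := by
            rcases h2 with h | h <;> simp [h]
          simp [pvPick, List.filter_cons, hr]
          refine ⟨?_, ?_, ?_⟩
          · push Not at h1; simp [h1.1, h1.2]
          · rcases h2 with h | h <;> simp [h]
          · push Not at h2''; simp [h2''.1, h2''.2]
        · by_cases h3 : pvBip r = "BIP1277I" ∨ pvBip r = "BIP1278I"
          · have hs : pvStep (e, a, m) r = (e, a, m ++ [r]) := by simp [pvStep, hr, h1, h2, h3]
            rw [hs, ih]
            simp [pvPick, List.filter_cons, hr]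
            refine ⟨?_, ?_, ?_⟩
            · push Not at h1; simp [h1.1, h1.2]
            · push Not at h2; simp [h2.1, h2.2]
            · rcases h3 with h | h <;> simp [h]
          · have hs : pvStep (e, a, m) r = (e, a, m) := by simp [pvStep, hr, h1, h2, h3]
            rw [hs, ih]
            push Not at h1; push Not at h2; push Not at h3
            simp [pvPick, hr, h1.1, h1.2, h2.1, h2.2, h3.1, h3.2]

-- ===== VERDICT (by name: the statement is the Claim_ definition above) =====
theorem get_broker_items_spec : Claim_equal_get_broker_items := by
  intro s _ _
  unfold Spec_get_broker_items get_broker_items get_broker_items_alt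
  exact pv_fold_eq _ [] [] []
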